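-- pv_equiv track=rewrite | github.com/Stirling-Tools/Stirling-PDF | scripts/translations/ai_translation_helper.py | _prioritize_translation_keys
-- ===== SOURCE A (Python) =====
-- from typing import Dict, List, Set, Tuple, Any, Optional
--
-- def _prioritize_translation_keys(untranslated: Dict[str, str], max_count: int) -> Dict[str, str]:
--     """Prioritize which keys to translate first based on importance."""
--     # Define priority order (higher score = higher priority)
--     priority_patterns = [
--         ('title', 10),
--         ('header', 9),
--         ('submit', 8),
--         ('selectText', 7),
--         ('prompt', 6),
--         ('desc', 5),
--         ('error', 8),
--         ('warning', 7),
--         ('save', 8),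
--         ('download', 8),
--         ('upload', 7),
--     ]
--
--     scored_keys = []
--     for key, value in untranslated.items():
--         score = 1  # base score
--         for pattern, pattern_score in priority_patterns:
--             if pattern.lower() in key.lower():
--                 score = max(score, pattern_score)
--         scored_keys.append((key, value, score))
--
--     # Sort by score (descending) and return top entries
--     scored_keys.sort(key=lambda x: x[2], reverse=True)
--     return {key: value for key, value, _ in scored_keys[:max_count]}
-- ===== SOURCE B (Python) =====
-- def _prioritize_translation_keys(untranslated, max_count):
--     """Bucket version: no sort; collect keys score-by-score in descending score order."""
--     priority_patterns = [
--         ('title', 10),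
--         ('header', 9),
--         ('submit', 8),
--         ('selectText', 7),
--         ('prompt', 6),
--         ('desc', 5),
--         ('error', 8),
--         ('warning', 7),
--         ('save', 8),
--         ('download', 8),
--         ('upload', 7),
--     ]
--
--     def score(key):
--         s = 1
--         for pattern, pattern_score in priority_patterns:
--             if pattern.lower() in key.lower():
--                 s = max(s, pattern_score)
--         return s
--
--     ordered = []
--     for target in (10, 9, 8, 7, 6, 5, 1):
--         for key, value in untranslated.items():
--             if score(key) == target:
--                 ordered.append((key, value))
--     return dict(ordered[:max_count])
-- ===== Notes on version B (the rewrite author's own statement) =====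
-- stated objective: alternative
-- what changed: B replaces the build-triples-then-stable-sort pipeline by a bucket collection: since only scores {10,9,8,7,6,5,1} are possible, it sweeps the dict once per score in descending order, appending matches in insertion order, then slices and builds the result dict.
import Mathlib
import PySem

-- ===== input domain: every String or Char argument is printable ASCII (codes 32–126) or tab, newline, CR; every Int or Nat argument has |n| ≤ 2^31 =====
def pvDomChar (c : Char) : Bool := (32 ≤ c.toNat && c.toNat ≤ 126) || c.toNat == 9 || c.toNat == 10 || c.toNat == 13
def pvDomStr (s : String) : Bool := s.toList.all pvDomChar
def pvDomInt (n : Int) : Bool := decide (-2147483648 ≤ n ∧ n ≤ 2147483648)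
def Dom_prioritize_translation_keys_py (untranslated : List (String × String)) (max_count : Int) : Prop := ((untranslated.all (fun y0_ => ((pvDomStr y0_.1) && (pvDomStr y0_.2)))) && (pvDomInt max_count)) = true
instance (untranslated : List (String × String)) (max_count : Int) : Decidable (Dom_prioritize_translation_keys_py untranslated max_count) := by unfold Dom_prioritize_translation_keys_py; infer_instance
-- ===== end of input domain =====

-- B replaces A's stable sort by descending-score bucket sweeps; objective: alternative algorithm, same cost class.

-- the priority pattern table (shared literal data of both programs)
def pvPatterns : List (String × Int) :=
  [("title", 10), ("header", 9), ("submit", 8), ("selectText", 7), ("prompt", 6),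
   ("desc", 5), ("error", 8), ("warning", 7), ("save", 8), ("download", 8), ("upload", 7)]

-- the inner scoring loop (identical in both Pythons): score = 1, then max over matching patterns
def pvScore (key : String) : Int :=
  pvPatterns.foldl
    (fun s p => if PySem.Str.isIn (PySem.Str.lower p.1) (PySem.Str.lower key) then max s p.2 else s) 1

-- ===== PORT A =====
def prioritize_translation_keys_py (untranslated : List (String × String)) (max_count : Int) : List (String × String) :=
  -- scored_keys: append (key, value, score) for each item
  let scored_keys := untranslated.foldl (fun acc kv => acc ++ [(kv.1, kv.2, pvScore kv.1)]) []
  -- sort by score descending (stable)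
  let sorted_keys := PySem.List.sorted scored_keys (fun x => x.2.2) true
  -- {key: value for key, value, _ in scored_keys[:max_count]}
  ((PySem.List.slice sorted_keys none (some max_count)).foldl
    (fun d x => d.insert x.1 x.2.1) PySem.Dict.empty).items

-- ===== PORT B =====
def prioritize_translation_keys_py_alt (untranslated : List (String × String)) (max_count : Int) : List (String × String) :=
  -- for target in (10,9,8,7,6,5,1): for key,value in items: if score(key)==target: append
  let ordered := ([10, 9, 8, 7, 6, 5, 1] : List Int).foldl
    (fun acc target => untranslated.foldl
      (fun acc2 kv => if pvScore kv.1 == target then acc2 ++ [kv] else acc2) acc) []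
  -- dict(ordered[:max_count])
  ((PySem.List.slice ordered none (some max_count)).foldl
    (fun d kv => d.insert kv.1 kv.2) PySem.Dict.empty).items

-- ===== PRECONDITION & SPEC =====
def Spec_prioritize_translation_keys_py (untranslated : List (String × String)) (max_count : Int) (out : List (String × String)) : Prop := out = prioritize_translation_keys_py_alt untranslated max_count
instance (untranslated : List (String × String)) (max_count : Int) (out : List (String × String)) : Decidable (Spec_prioritize_translation_keys_py untranslated max_count out) := by unfold Spec_prioritize_translation_keys_py; infer_instance

-- ===== CLAIM (what is proved, stated in full; the proofs are below) =====
def Claim_equal_prioritize_translation_keys_py : Prop := ∀ (untranslated : List (String × String)) (max_count : Int), Dom_prioritize_translation_keys_py untranslated max_count → Spec_prioritize_translation_keys_py untranslated max_count (prioritize_translation_keys_py untranslated max_count)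

-- ===== LEMMAS AND PROOFS =====

-- the score is always one of the table values (or the base 1)
theorem foldl_max_mem {α : Type} (c : α × Int → Bool) (S : List Int) :
    ∀ (l : List (α × Int)) (a : Int), a ∈ S → (∀ p ∈ l, p.2 ∈ S) →
      l.foldl (fun s p => if c p then max s p.2 else s) a ∈ S := by
  intro l
  induction l with
  | nil => intro a ha _; simpa using ha
  | cons p t ih =>
    intro a ha hl
    simp only [List.foldl_cons]
    apply ih
    · by_cases h : c p = true
      · simp only [h, if_true]
        rcases max_choice a p.2 with h' | h' <;> rw [h']
        · exact ha
        · exact hl p (by simp)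
      · simp only [h]; simpa using ha
    · intro q hq; exact hl q (by simp [hq])

theorem pvScore_mem (key : String) : pvScore key ∈ ([10, 9, 8, 7, 6, 5, 1] : List Int) := by
  unfold pvScore
  apply foldl_max_mem
  · decide
  · decide

-- insertBy walks past a block it never inserts before
theorem insertBy_append {α : Type} (before : α → α → Bool) (x : α) (as bs : List α)
    (h : ∀ y ∈ as, before x y = false) :
    PySem.List.insertBy before x (as ++ bs) = as ++ PySem.List.insertBy before x bs := by
  induction as with
  | nil => simp
  | cons a t ih =>
    have ha : before x a = false := h a (by simp)
    simp only [List.cons_append, PySem.List.insertBy, ha, Bool.false_eq_true, if_false]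
    rw [ih (fun y hy => h y (by simp [hy]))]

-- insertBy at the very front when every element comes strictly after x
theorem insertBy_front {α : Type} (before : α → α → Bool) (x : α) (bs : List α)
    (h : ∀ y ∈ bs, before x y = true) :
    PySem.List.insertBy before x bs = x :: bs := by
  cases bs with
  | nil => rfl
  | cons b t => simp [PySem.List.insertBy, h b (by simp)]

-- inserting x into descending buckets appends it to its own bucket
theorem insertBy_flatMap {α : Type} (key : α → Int) (x : α) :
    ∀ (S : List Int) (g : Int → List α), S.Pairwise (· > ·) → key x ∈ S →
      (∀ s ∈ S, ∀ y ∈ g s, key y = s) →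
      PySem.List.insertBy (fun a b => decide (key b < key a)) x (S.flatMap g) =
        S.flatMap (fun s => if s = key x then g s ++ [x] else g s) := by
  intro S
  induction S with
  | nil => intro g _ hx _; simp at hx
  | cons t S' ih =>
    intro g hS hx hg
    simp only [List.flatMap_cons]
    by_cases ht : t = key x
    · -- x belongs to the head bucket
      have hblock : ∀ y ∈ g t, (fun a b => decide (key b < key a)) x y = false := by
        intro y hy
        have := hg t (by simp) y hy
        simp [this, ht]
      rw [insertBy_append _ _ _ _ hblock]
      have hfront : ∀ y ∈ S'.flatMap g, (fun a b => decide (key b < key a)) x y = true := by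
        intro y hy
        rcases List.mem_flatMap.mp hy with ⟨s, hs, hys⟩
        have hkey := hg s (by simp [hs]) y hys
        have : s < t := (List.pairwise_cons.mp hS).1 s hs
        simp [hkey]; omega
      rw [insertBy_front _ _ _ hfront]
      have hnot : ∀ s ∈ S', ¬ (s = key x) := by
        intro s hs
        have : s < t := (List.pairwise_cons.mp hS).1 s hs
        omega
      have : S'.flatMap (fun s => if s = key x then g s ++ [x] else g s) = S'.flatMap g := by
        apply List.flatMap_congr
        intro s hs; simp [hnot s hs]
      rw [this, if_pos ht]
      simp
    · -- x belongs to a later bucket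
      have hx' : key x ∈ S' := by
        rcases List.mem_cons.mp hx with h | h
        · exact absurd h.symm ht
        · exact h
      have hblock : ∀ y ∈ g t, (fun a b => decide (key b < key a)) x y = false := by
        intro y hy
        have hkey := hg t (by simp) y hy
        have : key x < t := (List.pairwise_cons.mp hS).1 _ hx'
        simp [hkey]; omega
      rw [insertBy_append _ _ _ _ hblock]
      rw [ih g (List.pairwise_cons.mp hS).2 hx' (fun s hs => hg s (by simp [hs]))]
      rw [if_neg ht]

-- the stable descending sort is the concatenation of the score buckets
theorem sorted_rev_eq_flatMap_filter {α : Type} (key : α → Int) (S : List Int)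
    (hS : S.Pairwise (· > ·)) :
    ∀ (xs : List α), (∀ x ∈ xs, key x ∈ S) →
      PySem.List.sorted xs key true = S.flatMap (fun s => xs.filter (fun x => key x == s)) := by
  intro xs
  induction xs using List.reverseRecOn with
  | nil => intro _; simp [PySem.List.sorted]
  | append_singleton xs x ih =>
    intro hmem
    rw [PySem.List.sorted_rev_eq_foldl_insertBy, List.foldl_append, List.foldl_cons, List.foldl_nil,
        ← PySem.List.sorted_rev_eq_foldl_insertBy,
        ih (fun y hy => hmem y (by simp [hy]))]
    rw [insertBy_flatMap key x S _ hS (hmem x (by simp))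
        (fun s _ y hy => by simpa using (List.mem_filter.mp hy).2)]
    apply List.flatMap_congr
    intro s _
    by_cases h : s = key x
    · simp [List.filter_append, h]
    · have hks : ¬ (key x = s) := fun hc => h hc.symm
      simp [List.filter_append, hks, h]

-- B's nested append loops build exactly the bucket concatenation
theorem alt_ordered_eq_flatMap (untranslated : List (String × String)) :
    ([10, 9, 8, 7, 6, 5, 1] : List Int).foldl
      (fun acc target => untranslated.foldl
        (fun acc2 kv => if pvScore kv.1 == target then acc2 ++ [kv] else acc2) acc) [] =
    ([10, 9, 8, 7, 6, 5, 1] : List Int).flatMap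
      (fun s => untranslated.filter (fun kv => pvScore kv.1 == s)) := by
  have hone : ∀ (t : Int) (acc : List (String × String)),
      untranslated.foldl (fun acc2 kv => if pvScore kv.1 == t then acc2 ++ [kv] else acc2) acc =
        acc ++ untranslated.filter (fun kv => pvScore kv.1 == t) := by
    intro t acc
    induction untranslated generalizing acc with
    | nil => simp
    | cons kv l ih =>
      rw [List.foldl_cons, ih, List.filter_cons]
      by_cases h : (pvScore kv.1 == t) = true
      · simp [h]
      · simp [h]
  simp only [List.foldl_cons, List.foldl_nil, hone, List.flatMap_cons, List.flatMap_nil]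
  simp

-- slicing commutes with mapping (slice only inspects the length)
theorem slice_map {α β : Type} (f : α → β) (xs : List α) (a? b? : Option Int) :
    PySem.List.slice (xs.map f) a? b? = (PySem.List.slice xs a? b?).map f := by
  simp [PySem.List.slice, List.length_map, ← List.map_drop, ← List.map_take]

-- ===== VERDICT (by name: the statement is the Claim_ definition above) =====
theorem prioritize_translation_keys_py_spec : Claim_equal_prioritize_translation_keys_py := by
  intro untranslated max_count _
  unfold Spec_prioritize_translation_keys_py prioritize_translation_keys_py prioritize_translation_keys_py_alt
  have hscored : untranslated.foldl (fun acc kv => acc ++ [(kv.1, kv.2, pvScore kv.1)]) [] =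
      untranslated.map (fun kv => (kv.1, kv.2, pvScore kv.1)) := by
    rw [PySem.List.foldl_append_singleton_eq_map, List.nil_append]
  have hsort : PySem.List.sorted
        (untranslated.map (fun kv => (kv.1, kv.2, pvScore kv.1))) (fun x => x.2.2) true =
      (([10, 9, 8, 7, 6, 5, 1] : List Int).flatMap
        (fun s => untranslated.filter (fun kv => pvScore kv.1 == s))).map
          (fun kv => (kv.1, kv.2, pvScore kv.1)) := by
    rw [sorted_rev_eq_flatMap_filter (fun x => x.2.2) ([10, 9, 8, 7, 6, 5, 1] : List Int)
        (by decide) (untranslated.map (fun kv => (kv.1, kv.2, pvScore kv.1)))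
        (by intro x hx; rcases List.mem_map.mp hx with ⟨kv, _, rfl⟩; exact pvScore_mem kv.1)]
    rw [List.map_flatMap]
    apply List.flatMap_congr
    intro s _
    rw [List.filter_map]
    simp [Function.comp_def]
  simp only [hscored, hsort, alt_ordered_eq_flatMap, slice_map, List.foldl_map]
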